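-- pv_equiv track=rewrite | github.com/rhrlima/cbioge | examples/repair_test.py | reshape_mapping
-- ===== SOURCE A (Python) =====
-- def reshape_mapping(mapping):
--
--     new_mapping = []
--
--     index = 0
--     while index < len(mapping):
--         if mapping[index] == 'conv':
--             end = index+6
--         elif mapping[index] == 'avgpool':
--             end = index+3
--         else:
--             end = 2
--
--         new_mapping.append(mapping[index:end])
--         mapping = mapping[end:]
--
--     return new_mapping
-- ===== SOURCE B (Python) =====
-- def reshape_mapping(mapping):
--     if not mapping:
--         return []
--     size = 6 if mapping[0] == 'conv' else 3 if mapping[0] == 'avgpool' else 2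
--     return [mapping[:size]] + reshape_mapping(mapping[size:])
-- ===== Notes on version B (the rewrite author's own statement) =====
-- stated objective: simpler
-- what changed: Replaced the while-loop that keeps an accumulator, a never-incremented index variable and repeated reslicing of the remaining list by a direct structural recursion that peels one head chunk (6/3/2 by keyword) and conses it onto the recursive result.
import Mathlib
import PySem

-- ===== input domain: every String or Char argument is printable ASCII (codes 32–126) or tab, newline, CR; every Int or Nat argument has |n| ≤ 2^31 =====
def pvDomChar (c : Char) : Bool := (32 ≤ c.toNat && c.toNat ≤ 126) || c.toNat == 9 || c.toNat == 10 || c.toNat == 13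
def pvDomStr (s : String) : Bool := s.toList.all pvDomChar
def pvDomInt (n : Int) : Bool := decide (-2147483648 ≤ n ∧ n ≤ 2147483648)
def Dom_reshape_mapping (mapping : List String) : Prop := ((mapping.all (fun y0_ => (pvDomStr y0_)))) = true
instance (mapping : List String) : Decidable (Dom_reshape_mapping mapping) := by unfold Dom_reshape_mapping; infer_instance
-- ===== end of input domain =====

-- B replaces A's while-loop (accumulator, a never-incremented `index` variable, repeated
-- reslicing of the shrinking list) by a direct structural recursion peeling one head chunk.

-- ===== PORT A =====
-- A's `index` is initialized to 0 and never reassigned anywhere in the loop body,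
-- so it is transliterated as the literal 0 (the `index+6` / `index+3` sums are kept).
def reshape_mapping_loop (new_mapping : List (List String)) (mapping : List String) :
    List (List String) :=
  if _h : (0 : Int) < mapping.length then
    let e : Int :=
      if PySem.List.pyGet? mapping 0 = some "conv" then 0 + 6
      else if PySem.List.pyGet? mapping 0 = some "avgpool" then 0 + 3
      else 2
    reshape_mapping_loop (new_mapping ++ [PySem.List.slice mapping (some 0) (some e)])
      (PySem.List.slice mapping (some e) none)
  else new_mapping
termination_by mapping.length
decreasing_by
  split_ifs <;> · simp [pysem]; omega

def reshape_mapping (mapping : List String) : List (List String) :=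
  reshape_mapping_loop [] mapping

-- ===== PORT B =====
def pyChunkSize (x : String) : Nat :=
  if x = "conv" then 6 else if x = "avgpool" then 3 else 2

def reshape_mapping_alt : List String → List (List String)
  | [] => []
  | x :: rest =>
    (x :: rest).take (pyChunkSize x) :: reshape_mapping_alt ((x :: rest).drop (pyChunkSize x))
termination_by m => m.length
decreasing_by
  simp only [List.length_drop, List.length_cons]
  have : 0 < pyChunkSize x := by unfold pyChunkSize; split_ifs <;> omega
  omega

-- ===== PRECONDITION & SPEC =====
def Spec_reshape_mapping (mapping : List String) (out : List (List String)) : Prop := out = reshape_mapping_alt mapping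
instance (mapping : List String) (out : List (List String)) : Decidable (Spec_reshape_mapping mapping out) := by unfold Spec_reshape_mapping; infer_instance

-- ===== CLAIM (what is proved, stated in full; the proofs are below) =====
def Claim_equal_reshape_mapping : Prop := ∀ (mapping : List String), Dom_reshape_mapping mapping → Spec_reshape_mapping mapping (reshape_mapping mapping)

-- ===== LEMMAS AND PROOFS =====
lemma reshape_mapping_loop_eq (mapping : List String) :
    ∀ acc, reshape_mapping_loop acc mapping = acc ++ reshape_mapping_alt mapping := by
  induction mapping using reshape_mapping_alt.induct with
  | case1 =>
    intro acc
    rw [reshape_mapping_loop.eq_def, reshape_mapping_alt]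
    simp
  | case2 x rest ih =>
    intro acc
    rw [reshape_mapping_loop.eq_def, reshape_mapping_alt]
    have hx : PySem.List.pyGet? (x :: rest) 0 = some x := by simp [pysem]
    simp only [List.length_cons, hx, Option.some.injEq]
    rw [dif_pos (by push_cast; omega)]
    unfold pyChunkSize at ih ⊢
    split_ifs with h1 h2
    · simp only [if_pos h1] at ih
      rw [show PySem.List.slice (x :: rest) (some ((0:Int)+6)) = (x :: rest).drop 6 from by
        simp [pysem], ih,
        show PySem.List.slice (x :: rest) (some 0) (some ((0:Int)+6)) = (x :: rest).take 6 from by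
        simp [pysem]]
      simp
    · simp only [if_neg h1, if_pos h2] at ih
      rw [show PySem.List.slice (x :: rest) (some ((0:Int)+3)) = (x :: rest).drop 3 from by
        simp [pysem], ih,
        show PySem.List.slice (x :: rest) (some 0) (some ((0:Int)+3)) = (x :: rest).take 3 from by
        simp [pysem]]
      simp
    · simp only [if_neg h1, if_neg h2] at ih
      rw [show PySem.List.slice (x :: rest) (some (2:Int)) = (x :: rest).drop 2 from by
        simp [pysem], ih,
        show PySem.List.slice (x :: rest) (some 0) (some (2:Int)) = (x :: rest).take 2 from by
        simp [pysem]]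
      simp

-- ===== VERDICT (by name: the statement is the Claim_ definition above) =====
theorem reshape_mapping_spec : Claim_equal_reshape_mapping := by
  intro mapping _
  unfold Spec_reshape_mapping reshape_mapping
  rw [reshape_mapping_loop_eq]
  simp
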